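-- pv_equiv track=rewrite | github.com/RomanKostikov/Training_algorithms_5_0_Yandex | lesson_2/homework/task002.py | calculate_best_profit
-- ===== SOURCE A (Python) =====
-- def calculate_best_profit(N, K, prices):
--     best_profit = 0
--
--     for i in range(N - 1):
--         for j in range(1, min(K + 1, N - i)):
--             difference = prices[i + j] - prices[i]
--             if difference > best_profit:
--                 best_profit = difference
--
--     return best_profit
-- ===== SOURCE B (Python) =====
-- def calculate_best_profit(N, K, prices):
--     # O(N) sliding-window minimum via a monotonic queue of candidate buy days.
--     if K <= 0 or N <= 1:
--         return 0
--     best = 0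
--     dq = []      # indices of candidate buy days, prices strictly increasing
--     head = 0     # front pointer into dq (elements before head are expired)
--     for t in range(1, N):
--         i = t - 1  # buy day entering the window for sell day t
--         while len(dq) > head and prices[dq[-1]] >= prices[i]:
--             dq.pop()
--         dq.append(i)
--         while dq[head] < t - K:
--             head += 1
--         d = prices[t] - prices[dq[head]]
--         if d > best:
--             best = d
--     return best
-- ===== Notes on version B (the rewrite author's own statement) =====
-- stated objective: faster
-- what changed: Replaced the O(N*K) double loop over all (buy,sell) pairs by a single pass that maintains a monotonic queue of candidate buy days, so each sell day reads the sliding-window minimum in O(1).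
import Mathlib
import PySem

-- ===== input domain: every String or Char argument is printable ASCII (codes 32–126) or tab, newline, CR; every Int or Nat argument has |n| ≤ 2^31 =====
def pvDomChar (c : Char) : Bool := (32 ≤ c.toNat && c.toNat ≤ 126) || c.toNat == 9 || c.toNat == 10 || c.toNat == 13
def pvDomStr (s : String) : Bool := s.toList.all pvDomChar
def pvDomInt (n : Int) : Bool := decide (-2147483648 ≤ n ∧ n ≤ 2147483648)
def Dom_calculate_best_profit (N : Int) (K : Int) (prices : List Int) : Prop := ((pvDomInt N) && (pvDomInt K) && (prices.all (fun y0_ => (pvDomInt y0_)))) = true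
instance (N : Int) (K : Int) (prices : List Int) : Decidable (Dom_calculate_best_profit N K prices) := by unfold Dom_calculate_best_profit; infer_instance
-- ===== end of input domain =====

-- B replaces A's O(N*K) scan of all (buy, sell) pairs by one pass with a monotonic queue of
-- candidate buy days (sliding-window minimum); objective: faster (asymptotic).

-- ===== PORT A =====
-- Literal port of A; under Pre_ every index i and i+j is a valid non-negative index, so pyGetD _ _ 0 is exact.
def calculate_best_profit (N : Int) (K : Int) (prices : List Int) : Int :=
  (PySem.List.pyRange 0 (N - 1) 1).foldl (fun best_profit i =>
    (PySem.List.pyRange 1 (min (K + 1) (N - i)) 1).foldl (fun best_profit j =>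
      let difference := PySem.List.pyGetD prices (i + j) 0 - PySem.List.pyGetD prices i 0
      if difference > best_profit then difference else best_profit) best_profit) 0

-- ===== PORT B =====
-- `while len(dq) > head and prices[dq[-1]] >= prices[i]: dq.pop()`  (fuel = dq.length bounds the pops)
def pvPopBack (prices : List Int) (i : Int) (head : Int) : Nat → List Int → List Int
  | 0, dq => dq
  | fuel + 1, dq =>
    if head < (dq.length : Int) then
      match dq.getLast? with
      | some l =>
          if PySem.List.pyGetD prices l 0 ≥ PySem.List.pyGetD prices i 0 then
            pvPopBack prices i head fuel dq.dropLast
          else dq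
      | none => dq
    else dq

-- `while dq[head] < t - K: head += 1`  (fuel = dq.length bounds the advances; pyGet? none = IndexError, unreachable here)
def pvAdvance (dq : List Int) (limit : Int) : Nat → Int → Int
  | 0, head => head
  | fuel + 1, head =>
    match PySem.List.pyGet? dq head with
    | some v => if v < limit then pvAdvance dq limit fuel (head + 1) else head
    | none => head

def calculate_best_profit_alt (N : Int) (K : Int) (prices : List Int) : Int :=
  if K ≤ 0 ∨ N ≤ 1 then 0
  else
    ((PySem.List.pyRange 1 N 1).foldl (fun s t =>
      let i := t - 1
      let dq := pvPopBack prices i s.2.2 s.2.1.length s.2.1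
      let dq := dq ++ [i]
      let head := pvAdvance dq (t - K) dq.length s.2.2
      let d := PySem.List.pyGetD prices t 0 - PySem.List.pyGetD prices (PySem.List.pyGetD dq head 0) 0
      (if d > s.1 then d else s.1, dq, head))
      ((0 : Int), ([] : List Int), (0 : Int))).1

-- ===== PRECONDITION & SPEC =====
-- Pre_ excludes exactly the inputs where Python A raises IndexError: when there is at least one
-- (buy, sell) pair (N ≥ 2 and K ≥ 1), A reads prices[0..N-1], so it needs N ≤ len(prices).
def Pre_calculate_best_profit (N : Int) (K : Int) (prices : List Int) : Prop :=
  N ≤ (prices.length : Int) ∨ N ≤ 1 ∨ K ≤ 0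
instance (N : Int) (K : Int) (prices : List Int) : Decidable (Pre_calculate_best_profit N K prices) := by
  unfold Pre_calculate_best_profit; infer_instance

def pvWitness_calculate_best_profit : Int × Int × List Int := (3, 2, [5, 1, 4])

def Spec_calculate_best_profit (N : Int) (K : Int) (prices : List Int) (out : Int) : Prop := out = calculate_best_profit_alt N K prices
instance (N : Int) (K : Int) (prices : List Int) (out : Int) : Decidable (Spec_calculate_best_profit N K prices out) := by unfold Spec_calculate_best_profit; infer_instance

-- ===== CLAIM (what is proved, stated in full; the proofs are below) =====
def Claim_equal_calculate_best_profit : Prop := ∀ (N : Int) (K : Int) (prices : List Int), Dom_calculate_best_profit N K prices → Pre_calculate_best_profit N K prices → Spec_calculate_best_profit N K prices (calculate_best_profit N K prices)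

-- ===== LEMMAS AND PROOFS =====

-- `prices[i]` shorthand is written out everywhere; proof-side objects:

-- the candidate predicate: i is kept iff every later index before t has a strictly larger price
def pvP (prices : List Int) (t i : Int) : Bool :=
  (PySem.List.pyRange (i + 1) t 1).all
    (fun j => PySem.List.pyGetD prices i 0 < PySem.List.pyGetD prices j 0)

-- the live content of the queue after processing sell day t
def pvLive (prices : List Int) (K t : Int) : List Int :=
  (PySem.List.pyRange (max 0 (t - K)) t 1).filter (pvP prices t)

def pvTerm (prices : List Int) (K t : Int) : Int :=
  PySem.List.pyGetD prices t 0 - PySem.List.pyGetD prices ((pvLive prices K t).headD 0) 0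

def pvBestB (prices : List Int) (K T : Int) : Int :=
  (PySem.List.pyRange 1 T 1).foldl (fun b t => max b (pvTerm prices K t)) 0

-- generic: a foldl whose step satisfies a ≤-characterisation
theorem pvFoldl_le_iff {α : Type} (g : Int → α → Int) (Q : α → Int → Prop)
    (hg : ∀ b i c, g b i ≤ c ↔ b ≤ c ∧ Q i c) :
    ∀ (l : List α) (b c : Int), l.foldl g b ≤ c ↔ b ≤ c ∧ ∀ i ∈ l, Q i c := by
  intro l
  induction l with
  | nil => simp
  | cons a l ih =>
    intro b c
    simp only [List.foldl_cons, ih, hg, List.mem_cons]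
    constructor
    · rintro ⟨⟨h1, h2⟩, h3⟩
      refine ⟨h1, ?_⟩
      rintro i (rfl | hi)
      · exact h2
      · exact h3 i hi
    · rintro ⟨h1, h2⟩
      exact ⟨⟨h1, h2 a (Or.inl rfl)⟩, fun i hi => h2 i (Or.inr hi)⟩

theorem pvA_le_iff (N K : Int) (prices : List Int) (c : Int) :
    calculate_best_profit N K prices ≤ c ↔ 0 ≤ c ∧
      ∀ i ∈ PySem.List.pyRange 0 (N - 1) 1,
        ∀ j ∈ PySem.List.pyRange 1 (min (K + 1) (N - i)) 1,
          PySem.List.pyGetD prices (i + j) 0 - PySem.List.pyGetD prices i 0 ≤ c := by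
  unfold calculate_best_profit
  refine pvFoldl_le_iff
    (fun best i => (PySem.List.pyRange 1 (min (K + 1) (N - i)) 1).foldl (fun b j =>
      let difference := PySem.List.pyGetD prices (i + j) 0 - PySem.List.pyGetD prices i 0
      if difference > b then difference else b) best)
    (fun i c => ∀ j ∈ PySem.List.pyRange 1 (min (K + 1) (N - i)) 1,
      PySem.List.pyGetD prices (i + j) 0 - PySem.List.pyGetD prices i 0 ≤ c)
    (fun b i c => pvFoldl_le_iff _
      (fun j c => PySem.List.pyGetD prices (i + j) 0 - PySem.List.pyGetD prices i 0 ≤ c)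
      (fun b j c => by simp only [gt_iff_lt]; split_ifs <;> omega) _ b c)
    _ 0 c

theorem pvB_le_iff (prices : List Int) (K T c : Int) :
    pvBestB prices K T ≤ c ↔ 0 ≤ c ∧ ∀ t ∈ PySem.List.pyRange 1 T 1, pvTerm prices K t ≤ c := by
  unfold pvBestB
  exact pvFoldl_le_iff (fun b t => max b (pvTerm prices K t))
    (fun t c => pvTerm prices K t ≤ c) (fun b t c => max_le_iff) _ 0 c

-- pvP spelled out as a quantifier
theorem pvP_true_iff (prices : List Int) (t i : Int) :
    pvP prices t i = true ↔ ∀ j : Int, i < j → j < t →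
      PySem.List.pyGetD prices i 0 < PySem.List.pyGetD prices j 0 := by
  simp only [pvP, List.all_eq_true, decide_eq_true_eq, PySem.List.mem_pyRange_one]
  constructor
  · intro h j h1 h2; exact h j ⟨by omega, h2⟩
  · rintro h j ⟨h1, h2⟩; exact h j (by omega) h2

-- head of the filtered window exists, lies in the window, and has the minimal price
theorem pvLive_head (prices : List Int) (t : Int) :
    ∀ (k : Nat) (a : Int), a < t → (t - a).toNat = k →
    ((PySem.List.pyRange a t 1).filter (pvP prices t) ≠ []) ∧
    ((PySem.List.pyRange a t 1).filter (pvP prices t)).headD 0 ∈ PySem.List.pyRange a t 1 ∧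
    ∀ x ∈ PySem.List.pyRange a t 1,
      PySem.List.pyGetD prices (((PySem.List.pyRange a t 1).filter (pvP prices t)).headD 0) 0 ≤
        PySem.List.pyGetD prices x 0 := by
  intro k
  induction k with
  | zero => intro a h hk; omega
  | succ k ih =>
    intro a h hk
    rw [PySem.List.pyRange_one_cons h]
    by_cases hp : pvP prices t a = true
    · simp only [List.filter_cons, hp, if_true]
      refine ⟨by simp, by simp, ?_⟩
      intro x hx
      simp only [List.headD_cons]
      rcases List.mem_cons.mp hx with rfl | hx
      · exact le_refl _
      · rw [PySem.List.mem_pyRange_one] at hx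
        exact le_of_lt ((pvP_true_iff prices t a).mp hp x (by omega) (by omega))
    · have hne : a + 1 < t := by
        by_contra hh
        have ht1 : t = a + 1 := by omega
        apply hp
        subst ht1
        simp [pvP, PySem.List.pyRange_one_eq_nil (by omega : a + 1 ≤ a + 1)]
      obtain ⟨j, hj1, hj2, hjp⟩ :
          ∃ j : Int, a < j ∧ j < t ∧ ¬ PySem.List.pyGetD prices a 0 < PySem.List.pyGetD prices j 0 := by
        by_contra hh
        refine hp ((pvP_true_iff prices t a).mpr fun j h1 h2 => ?_)
        by_contra hlt
        exact hh ⟨j, h1, h2, hlt⟩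
      have IH := ih (a + 1) hne (by omega)
      have hfil : pvP prices t a = false := by simpa using hp
      simp only [List.filter_cons, hfil, if_false, Bool.false_eq_true]
      refine ⟨IH.1, List.mem_cons.mpr (Or.inr IH.2.1), ?_⟩
      intro x hx
      rcases List.mem_cons.mp hx with rfl | hx
      · have hjm : j ∈ PySem.List.pyRange (x + 1) t 1 := by
          rw [PySem.List.mem_pyRange_one]; omega
        have := IH.2.2 j hjm
        omega
      · exact IH.2.2 x hx

theorem pvLive_ne_nil (prices : List Int) (K t : Int) (hK : 1 ≤ K) (ht : 1 ≤ t) :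
    pvLive prices K t ≠ [] :=
  (pvLive_head prices t ((t - max 0 (t - K)).toNat) (max 0 (t - K)) (by omega) rfl).1

theorem pvLive_head_mem (prices : List Int) (K t : Int) (hK : 1 ≤ K) (ht : 1 ≤ t) :
    (pvLive prices K t).headD 0 ∈ PySem.List.pyRange (max 0 (t - K)) t 1 :=
  (pvLive_head prices t ((t - max 0 (t - K)).toNat) (max 0 (t - K)) (by omega) rfl).2.1

theorem pvLive_head_min (prices : List Int) (K t : Int) (hK : 1 ≤ K) (ht : 1 ≤ t) :
    ∀ x ∈ PySem.List.pyRange (max 0 (t - K)) t 1,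
      PySem.List.pyGetD prices ((pvLive prices K t).headD 0) 0 ≤ PySem.List.pyGetD prices x 0 :=
  (pvLive_head prices t ((t - max 0 (t - K)).toNat) (max 0 (t - K)) (by omega) rfl).2.2

-- prices strictly increase along any filtered window
theorem pvFilter_pairwise (prices : List Int) (a t : Int) :
    ((PySem.List.pyRange a t 1).filter (pvP prices t)).Pairwise
      (fun i j => PySem.List.pyGetD prices i 0 < PySem.List.pyGetD prices j 0) := by
  have h1 : (PySem.List.pyRange a t 1).Pairwise (· < ·) := PySem.List.pairwise_lt_pyRange_one a t
  have h2 := h1.sublist (List.filter_sublist (p := pvP prices t))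
  refine List.Pairwise.imp_of_mem ?_ h2
  intro x y hx hy hxy
  have hpx : pvP prices t x = true := List.of_mem_filter hx
  have hyr : y ∈ PySem.List.pyRange a t 1 := List.mem_of_mem_filter hy
  rw [PySem.List.mem_pyRange_one] at hyr
  exact (pvP_true_iff prices t x).mp hpx y hxy (by omega)

theorem pvLive_pairwise (prices : List Int) (K t : Int) :
    (pvLive prices K t).Pairwise
      (fun i j => PySem.List.pyGetD prices i 0 < PySem.List.pyGetD prices j 0) :=
  pvFilter_pairwise prices (max 0 (t - K)) t

-- one-step unfoldings of the back-popping loop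
theorem pvPopBack_concat (prices : List Int) (x head : Int) (fuel : Nat) (dq : List Int) (a : Int)
    (h : head < ((dq ++ [a]).length : Int)) :
    pvPopBack prices x head (fuel + 1) (dq ++ [a]) =
      if PySem.List.pyGetD prices a 0 ≥ PySem.List.pyGetD prices x 0 then
        pvPopBack prices x head fuel dq
      else dq ++ [a] := by
  rw [pvPopBack]
  rw [if_pos h]
  simp only [List.getLast?_concat, List.dropLast_concat]

theorem pvPopBack_stop (prices : List Int) (x head : Int) (fuel : Nat) (dq : List Int)
    (h : ¬ head < (dq.length : Int)) :
    pvPopBack prices x head fuel dq = dq := by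
  cases fuel with
  | zero => rw [pvPopBack]
  | succ fuel => rw [pvPopBack, if_neg h]

-- the back-popping loop computes a filter on a price-increasing live segment
theorem pvPopBack_spec (prices : List Int) (x : Int) (dead : List Int) (live : List Int) :
    ∀ (fuel : Nat), live.length ≤ fuel →
    live.Pairwise (fun i j => PySem.List.pyGetD prices i 0 < PySem.List.pyGetD prices j 0) →
    pvPopBack prices x (dead.length : Int) fuel (dead ++ live) =
      dead ++ live.filter (fun idx => decide (PySem.List.pyGetD prices idx 0 < PySem.List.pyGetD prices x 0)) := by
  induction live using List.reverseRecOn with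
  | nil =>
    intro fuel _ _
    simp only [List.append_nil, List.filter_nil]
    exact pvPopBack_stop prices x _ fuel dead (by omega)
  | append_singleton L a ih =>
    intro fuel hfuel hpw
    have hfl : L.length + 1 ≤ fuel := by simpa using hfuel
    obtain ⟨f, rfl⟩ : ∃ f, fuel = f + 1 := ⟨fuel - 1, by omega⟩
    have hpwL : L.Pairwise (fun i j => PySem.List.pyGetD prices i 0 < PySem.List.pyGetD prices j 0) :=
      hpw.sublist (List.sublist_append_left L [a])
    have hlast : ∀ l ∈ L, PySem.List.pyGetD prices l 0 < PySem.List.pyGetD prices a 0 := by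
      intro l hl
      exact (List.pairwise_append.mp hpw).2.2 l hl a (by simp)
    have hassoc : dead ++ (L ++ [a]) = (dead ++ L) ++ [a] := (List.append_assoc dead L [a]).symm
    rw [hassoc, pvPopBack_concat prices x _ f (dead ++ L) a (by simp)]
    by_cases hge : PySem.List.pyGetD prices a 0 ≥ PySem.List.pyGetD prices x 0
    · rw [if_pos hge, ih f (by omega) hpwL]
      have hna : ¬ PySem.List.pyGetD prices a 0 < PySem.List.pyGetD prices x 0 := by omega
      simp [List.filter_append, hna]
    · rw [if_neg hge]
      have hfix : (L ++ [a]).filter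
          (fun idx => decide (PySem.List.pyGetD prices idx 0 < PySem.List.pyGetD prices x 0)) = L ++ [a] := by
        apply List.filter_eq_self.mpr
        intro b hb
        rcases List.mem_append.mp hb with hb | hb
        · have := hlast b hb; simp; omega
        · simp at hb; subst hb; simp; omega
      rw [hfix, hassoc]

-- the front-advancing loop skips exactly the expired prefix
theorem pvAdvance_spec (c : Int) (w : List Int) :
    ∀ (pre : List Int) (z : Int) (rest : List Int) (fuel : Nat),
    (∀ x ∈ w, x < c) → ¬ z < c → w.length + 1 ≤ fuel →
    pvAdvance (pre ++ (w ++ z :: rest)) c fuel (pre.length : Int) =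
      (pre.length : Int) + (w.length : Int) := by
  induction w with
  | nil =>
    intro pre z rest fuel _ hz hfuel
    obtain ⟨f, rfl⟩ : ∃ f, fuel = f + 1 := ⟨fuel - 1, by omega⟩
    rw [pvAdvance]
    simp only [List.nil_append, PySem.List.pyGet?_append_length]
    rw [if_neg hz]
    simp
  | cons a w ih =>
    intro pre z rest fuel hw hz hfuel
    obtain ⟨f, rfl⟩ : ∃ f, fuel = f + 1 := ⟨fuel - 1, by omega⟩
    rw [pvAdvance]
    have hsh : pre ++ ((a :: w) ++ z :: rest) = pre ++ a :: (w ++ z :: rest) := by simp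
    rw [hsh]
    simp only [PySem.List.pyGet?_append_length]
    rw [if_pos (hw a (by simp))]
    have hsh2 : pre ++ a :: (w ++ z :: rest) = (pre ++ [a]) ++ (w ++ z :: rest) := by simp
    have hsh3 : (pre.length : Int) + 1 = ((pre ++ [a]).length : Int) := by simp
    rw [hsh2, hsh3, ih (pre ++ [a]) z rest f (fun x hx => hw x (by simp [hx])) hz (by simpa using hfuel)]
    simp
    omega

-- dropWhile = filter on a sorted list
theorem pvDropWhile_sorted (c : Int) (l : List Int) (h : l.Pairwise (· < ·)) :
    l.dropWhile (fun x => decide (x < c)) = l.filter (fun x => decide (c ≤ x)) := by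
  induction l with
  | nil => rfl
  | cons a l ih =>
    rw [List.pairwise_cons] at h
    by_cases hac : a < c
    · rw [List.dropWhile_cons_of_pos (by simpa using hac), List.filter_cons_of_neg (by simp; omega)]
      exact ih h.2
    · rw [List.dropWhile_cons_of_neg (by simpa using hac), List.filter_cons_of_pos (by simp; omega)]
      congr 1
      apply (List.filter_eq_self.mpr _).symm
      intro b hb
      have := h.1 b hb
      simp
      omega

theorem pvRange_filter_ge (t : Int) :
    ∀ (k : Nat) (a c : Int), (t - a).toNat = k →
    (PySem.List.pyRange a t 1).filter (fun x => decide (c ≤ x)) = PySem.List.pyRange (max a c) t 1 := by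
  intro k
  induction k with
  | zero =>
    intro a c hk
    rw [PySem.List.pyRange_one_eq_nil (by omega), PySem.List.pyRange_one_eq_nil (by omega)]
    rfl
  | succ k ih =>
    intro a c hk
    have ha : a < t := by omega
    rw [PySem.List.pyRange_one_cons ha]
    by_cases hca : c ≤ a
    · rw [List.filter_cons_of_pos (by simpa using hca)]
      rw [ih (a + 1) c (by omega)]
      have h1 : max (a + 1) c = a + 1 := by omega
      have h2 : max a c = a := by omega
      rw [h1, h2, ← PySem.List.pyRange_one_cons ha]
    · rw [List.filter_cons_of_neg (by simpa using hca)]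
      rw [ih (a + 1) c (by omega)]
      congr 1
      omega

theorem pvP_split (prices : List Int) (t i : Int) (h : i < t - 1) :
    pvP prices t i = (pvP prices (t - 1) i &&
      decide (PySem.List.pyGetD prices i 0 < PySem.List.pyGetD prices (t - 1) 0)) := by
  unfold pvP
  have hr : PySem.List.pyRange (i + 1) t 1 = PySem.List.pyRange (i + 1) (t - 1) 1 ++ [t - 1] := by
    have h2 := PySem.List.pyRange_one_succ_right (a := i + 1) (b := t - 1) (by omega)
    have h3 : t - 1 + 1 = t := by omega
    rw [h3] at h2
    exact h2
  rw [hr, List.all_append]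
  simp

theorem pvP_self (prices : List Int) (t : Int) : pvP prices t (t - 1) = true := by
  simp [pvP]

theorem pvGetD_append_headD (l r : List Int) (d : Int) (h : r ≠ []) :
    PySem.List.pyGetD (l ++ r) (l.length : Int) d = r.headD d := by
  rw [PySem.List.pyGetD_natCast, List.getD_eq_getElem?_getD, List.getElem?_append_right (le_refl _)]
  cases r with
  | nil => exact absurd rfl h
  | cons a r => simp

theorem pvBestB_succ (prices : List Int) (K t : Int) (ht : 1 ≤ t) :
    pvBestB prices K (t + 1) = max (pvBestB prices K t) (pvTerm prices K t) := by
  unfold pvBestB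
  rw [PySem.List.pyRange_one_succ_right ht, List.foldl_append]
  rfl

-- one loop iteration of B, in terms of the proof-side objects
theorem pvStep (prices : List Int) (K : Int) (hK : 1 ≤ K) (t : Int) (ht : 1 ≤ t)
    (dead : List Int) (b : Int) :
    ∃ dead' : List Int,
      (fun (s : Int × List Int × Int) (t : Int) =>
        let i := t - 1
        let dq := pvPopBack prices i s.2.2 s.2.1.length s.2.1
        let dq := dq ++ [i]
        let head := pvAdvance dq (t - K) dq.length s.2.2
        let d := PySem.List.pyGetD prices t 0 - PySem.List.pyGetD prices (PySem.List.pyGetD dq head 0) 0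
        (if d > s.1 then d else s.1, dq, head))
        (b, dead ++ pvLive prices K (t - 1), (dead.length : Int)) t
      = (max b (pvTerm prices K t), dead' ++ pvLive prices K t, (dead'.length : Int)) := by
  dsimp only
  rw [pvPopBack_spec prices (t - 1) dead (pvLive prices K (t - 1)) _ (by simp)
    (pvLive_pairwise prices K (t - 1))]
  set Lf := (pvLive prices K (t - 1)).filter
    (fun idx => decide (PySem.List.pyGetD prices idx 0 < PySem.List.pyGetD prices (t - 1) 0)) with hLf
  have hq : dead ++ Lf ++ [t - 1] = dead ++ (Lf ++ [t - 1]) := by simp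
  rw [hq]
  set live2 := Lf ++ [t - 1] with hlive2def
  have hE : live2 = (PySem.List.pyRange (max 0 (t - 1 - K)) t 1).filter (pvP prices t) := by
    have hwin : PySem.List.pyRange (max 0 (t - 1 - K)) t 1 =
        PySem.List.pyRange (max 0 (t - 1 - K)) (t - 1) 1 ++ [t - 1] := by
      have h2 := PySem.List.pyRange_one_succ_right (a := max 0 (t - 1 - K)) (b := t - 1) (by omega)
      rw [show t - 1 + 1 = t from by omega] at h2
      exact h2
    rw [hlive2def, hwin, List.filter_append]
    congr 1
    · rw [hLf]
      unfold pvLive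
      rw [List.filter_filter]
      refine List.filter_congr ?_
      intro a ha
      rw [PySem.List.mem_pyRange_one] at ha
      rw [pvP_split prices t a (by omega)]
      exact Bool.and_comm _ _
    · simp [pvP_self]
  have hmem : t - 1 ∈ live2 := by rw [hlive2def]; simp
  have hdwne : live2.dropWhile (fun x => decide (x < t - K)) ≠ [] := by
    intro hnil
    have := List.dropWhile_eq_nil_iff.mp hnil (t - 1) hmem
    simp at this
    omega
  obtain ⟨z, rest, hzr⟩ := List.exists_cons_of_ne_nil hdwne
  have hz : ¬ z < t - K := by
    have hh := List.head_dropWhile_not (fun x => decide (x < t - K)) hdwne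
    have hhz : (live2.dropWhile (fun x => decide (x < t - K))).head hdwne = z := by
      simp [hzr]
    rw [hhz] at hh
    simpa using hh
  have hwlt : ∀ x ∈ live2.takeWhile (fun x => decide (x < t - K)), x < t - K := by
    intro x hx
    simpa using List.mem_takeWhile_imp hx
  have hwd : live2.takeWhile (fun x => decide (x < t - K)) ++ (z :: rest) = live2 := by
    rw [← hzr]
    exact List.takeWhile_append_dropWhile
  have h2 : pvAdvance (dead ++ live2) (t - K) (dead ++ live2).length (dead.length : Int)
      = ((dead.length : Int) + ((live2.takeWhile (fun x => decide (x < t - K))).length : Int)) := by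
    conv_lhs => rw [← hwd]
    rw [show dead ++ (live2.takeWhile (fun x => decide (x < t - K)) ++ z :: rest)
        = dead ++ (live2.takeWhile (fun x => decide (x < t - K)) ++ z :: rest) from rfl]
    refine pvAdvance_spec (t - K) _ dead z rest _ hwlt hz ?_
    have hlen1 : (dead ++ (live2.takeWhile (fun x => decide (x < t - K)) ++ z :: rest)).length
        = dead.length + (live2.takeWhile (fun x => decide (x < t - K))).length + rest.length + 1 := by
      simp
      omega
    omega
  have hlt2 : live2.Pairwise (· < ·) := by
    rw [hE]
    exact (PySem.List.pairwise_lt_pyRange_one _ _).sublist List.filter_sublist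
  have hdw : live2.dropWhile (fun x => decide (x < t - K)) = pvLive prices K t := by
    rw [pvDropWhile_sorted (t - K) live2 hlt2, hE, List.filter_filter]
    unfold pvLive
    calc (PySem.List.pyRange (max 0 (t - 1 - K)) t 1).filter
          (fun a => decide (t - K ≤ a) && pvP prices t a)
        = (PySem.List.pyRange (max 0 (t - 1 - K)) t 1).filter
          (fun a => pvP prices t a && decide (t - K ≤ a)) := by
          refine List.filter_congr ?_
          intro a _
          exact Bool.and_comm _ _
      _ = ((PySem.List.pyRange (max 0 (t - 1 - K)) t 1).filter
            (fun a => decide (t - K ≤ a))).filter (pvP prices t) := (List.filter_filter).symm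
      _ = (PySem.List.pyRange (max (max 0 (t - 1 - K)) (t - K)) t 1).filter (pvP prices t) := by
          rw [pvRange_filter_ge t ((t - max 0 (t - 1 - K)).toNat) (max 0 (t - 1 - K)) (t - K) rfl]
      _ = (PySem.List.pyRange (max 0 (t - K)) t 1).filter (pvP prices t) := by
          rw [show max (max 0 (t - 1 - K)) (t - K) = max 0 (t - K) from by omega]
  have hlivene : pvLive prices K t ≠ [] := pvLive_ne_nil prices K t hK ht
  refine ⟨dead ++ live2.takeWhile (fun x => decide (x < t - K)), ?_⟩
  rw [h2]
  have hsplit2 : dead ++ live2 =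
      (dead ++ live2.takeWhile (fun x => decide (x < t - K))) ++
        live2.dropWhile (fun x => decide (x < t - K)) := by
    conv_lhs => rw [← List.takeWhile_append_dropWhile (p := fun x => decide (x < t - K)) (l := live2)]
    simp
  have hlen2 : (dead.length : Int) + ((live2.takeWhile (fun x => decide (x < t - K))).length : Int)
      = (((dead ++ live2.takeWhile (fun x => decide (x < t - K))).length : Int)) := by
    simp
  rw [hsplit2, hlen2, pvGetD_append_headD _ _ _ (by rw [hdw]; exact hlivene), hdw]
  rw [show PySem.List.pyGetD prices t 0 -
      PySem.List.pyGetD prices ((pvLive prices K t).headD 0) 0 = pvTerm prices K t from rfl]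
  rw [show (if pvTerm prices K t > b then pvTerm prices K t else b) = max b (pvTerm prices K t)
      from by split_ifs <;> omega]

-- main loop invariant

theorem pvBloop (prices : List Int) (K : Int) (hK : 1 ≤ K) (n : Nat) :
    ∃ dead : List Int,
      (PySem.List.pyRange 1 (1 + n) 1).foldl (fun s t =>
        let i := t - 1
        let dq := pvPopBack prices i s.2.2 s.2.1.length s.2.1
        let dq := dq ++ [i]
        let head := pvAdvance dq (t - K) dq.length s.2.2
        let d := PySem.List.pyGetD prices t 0 - PySem.List.pyGetD prices (PySem.List.pyGetD dq head 0) 0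
        (if d > s.1 then d else s.1, dq, head))
        ((0 : Int), ([] : List Int), (0 : Int))
      = (pvBestB prices K (1 + n), dead ++ pvLive prices K n, (dead.length : Int)) := by
  induction n with
  | zero =>
    refine ⟨[], ?_⟩
    simp only [Nat.cast_zero]
    have e1 : PySem.List.pyRange 1 (1 + (0 : Int)) 1 = [] := PySem.List.pyRange_one_eq_nil (by omega)
    rw [e1]
    simp only [List.foldl_nil]
    have e2 : pvBestB prices K (1 + (0 : Int)) = 0 := by unfold pvBestB; rw [e1]; rfl
    have e3 : pvLive prices K (0 : Int) = [] := by
      unfold pvLive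
      rw [PySem.List.pyRange_one_eq_nil (by omega)]
      rfl
    rw [e2, e3]
    simp
  | succ n ih =>
    obtain ⟨dead, hd⟩ := ih
    have hc2 : (((n + 1 : Nat)) : Int) = 1 + (n : Int) := by push_cast; ring
    rw [hc2]
    rw [show (1 : Int) + (1 + (n : Int)) = (1 + (n : Int)) + 1 from by ring]
    rw [PySem.List.pyRange_one_succ_right (by omega), List.foldl_append, hd]
    obtain ⟨dead', hstep⟩ := pvStep prices K hK (1 + (n : Int)) (by omega) dead
      (pvBestB prices K (1 + (n : Int)))
    rw [show ((1 : Int) + (n : Int)) - 1 = (n : Int) from by omega] at hstep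
    refine ⟨dead', ?_⟩
    rw [List.foldl_cons, List.foldl_nil, pvBestB_succ prices K (1 + (n : Int)) (by omega)]
    exact hstep

theorem pvB_eq_bestB (N K : Int) (prices : List Int) (hK : 1 ≤ K) (hN : 2 ≤ N) :
    calculate_best_profit_alt N K prices = pvBestB prices K N := by
  unfold calculate_best_profit_alt
  rw [if_neg (by omega : ¬ (K ≤ 0 ∨ N ≤ 1))]
  obtain ⟨dead, hd⟩ := pvBloop prices K hK (N - 1).toNat
  rw [show (1 + (((N - 1).toNat : Nat) : Int)) = N from by omega] at hd
  rw [hd]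

-- ===== VERDICT (by name: the statement is the Claim_ definition above) =====
theorem calculate_best_profit_spec : Claim_equal_calculate_best_profit := by
  unfold Claim_equal_calculate_best_profit
  intro N K prices _ _
  unfold Spec_calculate_best_profit
  by_cases hdeg : K ≤ 0 ∨ N ≤ 1
  · have hB : calculate_best_profit_alt N K prices = 0 := by
      unfold calculate_best_profit_alt
      rw [if_pos hdeg]
    rw [hB]
    have h1 : calculate_best_profit N K prices ≤ 0 := by
      rw [pvA_le_iff]
      refine ⟨le_refl 0, ?_⟩
      intro i hi j hj
      rw [PySem.List.mem_pyRange_one] at hi hj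
      exfalso
      omega
    have h2 : 0 ≤ calculate_best_profit N K prices :=
      ((pvA_le_iff N K prices _).mp (le_refl _)).1
    omega
  · have hK : 1 ≤ K := by omega
    have hN : 2 ≤ N := by omega
    rw [pvB_eq_bestB N K prices hK hN]
    apply le_antisymm
    · rw [pvA_le_iff]
      refine ⟨((pvB_le_iff prices K N _).mp (le_refl _)).1, ?_⟩
      intro i hi j hj
      rw [PySem.List.mem_pyRange_one] at hi hj
      have hterm : pvTerm prices K (i + j) ≤ pvBestB prices K N :=
        ((pvB_le_iff prices K N _).mp (le_refl _)).2 (i + j)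
          (PySem.List.mem_pyRange_one.mpr ⟨by omega, by omega⟩)
      have hmin := pvLive_head_min prices K (i + j) hK (by omega) i
        (PySem.List.mem_pyRange_one.mpr ⟨by omega, by omega⟩)
      unfold pvTerm at hterm
      omega
    · rw [pvB_le_iff]
      refine ⟨((pvA_le_iff N K prices _).mp (le_refl _)).1, ?_⟩
      intro t ht
      rw [PySem.List.mem_pyRange_one] at ht
      have hi0 := pvLive_head_mem prices K t hK (by omega)
      rw [PySem.List.mem_pyRange_one] at hi0
      have hpair := ((pvA_le_iff N K prices _).mp (le_refl _)).2
        ((pvLive prices K t).headD 0)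
        (PySem.List.mem_pyRange_one.mpr ⟨by omega, by omega⟩)
        (t - (pvLive prices K t).headD 0)
        (PySem.List.mem_pyRange_one.mpr ⟨by omega, by omega⟩)
      rw [show (pvLive prices K t).headD 0 + (t - (pvLive prices K t).headD 0) = t from by omega]
        at hpair
      unfold pvTerm
      omega
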